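-- pv_equiv track=rewrite | github.com/TomasWard1/python | practicas/recursion.py | ejercicio_parcial
-- ===== SOURCE A (Python) =====
-- from typing import List, Tuple
--
-- def ejercicio_parcial(xs:List[int]):
--     if len(xs) == 0:
--             return 0
--     else:
--         es_positivo:bool = xs[0] > 0
--         if es_positivo:
--             return ejercicio_parcial(xs[1:]) + xs[0]
--         else:
--             return ejercicio_parcial(xs[1:])
-- ===== SOURCE B (Python) =====
-- def ejercicio_parcial(xs):
--     total = 0
--     for x in xs:
--         if x > 0:
--             total += x
--     return total
-- ===== Notes on version B (the rewrite author's own statement) =====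
-- stated objective: faster
-- what changed: Replaced head/tail recursion with list slicing by a single flat loop with an accumulator.
import Mathlib
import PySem

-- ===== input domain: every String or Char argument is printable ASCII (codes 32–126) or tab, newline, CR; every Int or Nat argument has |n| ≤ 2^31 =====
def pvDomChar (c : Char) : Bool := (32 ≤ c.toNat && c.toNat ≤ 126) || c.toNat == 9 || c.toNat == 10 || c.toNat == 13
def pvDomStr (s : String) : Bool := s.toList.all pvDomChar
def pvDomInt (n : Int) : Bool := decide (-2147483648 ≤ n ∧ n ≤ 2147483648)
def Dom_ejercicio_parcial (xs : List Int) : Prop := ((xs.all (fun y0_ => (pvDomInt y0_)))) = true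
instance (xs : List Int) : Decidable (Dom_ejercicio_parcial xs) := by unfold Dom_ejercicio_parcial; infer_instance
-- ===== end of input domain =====

-- ===== PORT A =====
def ejercicio_parcial (xs : List Int) : Int :=
  match xs with
  | [] => 0
  | x :: rest =>
    let es_positivo : Bool := decide (x > 0)
    if es_positivo then ejercicio_parcial rest + x
    else ejercicio_parcial rest

-- ===== PORT B =====
def ejercicio_parcial_alt (xs : List Int) : Int :=
  xs.foldl (fun total x => if x > 0 then total + x else total) 0

-- ===== PRECONDITION & SPEC =====
def Spec_ejercicio_parcial (xs : List Int) (out : Int) : Prop := out = ejercicio_parcial_alt xs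
instance (xs : List Int) (out : Int) : Decidable (Spec_ejercicio_parcial xs out) := by unfold Spec_ejercicio_parcial; infer_instance

-- ===== CLAIM (what is proved, stated in full; the proofs are below) =====
def Claim_equal_ejercicio_parcial : Prop := ∀ (xs : List Int), Dom_ejercicio_parcial xs → Spec_ejercicio_parcial xs (ejercicio_parcial xs)

-- ===== LEMMAS AND PROOFS =====

-- ===== VERDICT (by name: the statement is the Claim_ definition above) =====
theorem fold_shift (xs : List Int) (acc : Int) :
    xs.foldl (fun total x => if x > 0 then total + x else total) acc
      = acc + xs.foldl (fun total x => if x > 0 then total + x else total) 0 := by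
  induction xs generalizing acc with
  | nil => simp
  | cons x rest ih =>
    simp only [List.foldl]
    rw [ih, ih (if x > 0 then 0 + x else 0)]
    split_ifs <;> ring

theorem ejercicio_eq (xs : List Int) : ejercicio_parcial xs = ejercicio_parcial_alt xs := by
  induction xs with
  | nil => rfl
  | cons x rest ih =>
    simp only [ejercicio_parcial, ejercicio_parcial_alt, List.foldl] at *
    rw [fold_shift]
    by_cases h : x > 0
    · simp [h, ih]; ring
    · simp [h, ih]

theorem ejercicio_parcial_spec : Claim_equal_ejercicio_parcial := by
  intro xs _
  exact ejercicio_eq xs
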